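-- pv_equiv track=rewrite | github.com/manubot/catalog | process-catalog.py | get_date_summary
-- ===== SOURCE A (Python) =====
-- def get_date(csl_item):
--     """
--     Return date in iso-like format, such as:
--     2019
--     2019-05
--     2019-05-01
--     """
--     try:
--         return '-'.join(f'{int(x):02d}' for x in csl_item['issued']['date-parts'][0])
--     except Exception:
--         return None
--
-- def get_date_summary(csl_item):
--     """
--     Return date like
--     2019
--     Jun 2019
--     """
--     date = get_date(csl_item)
--     if not date:
--         return None
--     import calendar
--     date_parts = [int(x) for x in date.split('-')]
--     if len(date_parts) == 1:
--         year, = date_parts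
--         month = 0
--     else:
--         year, month = date_parts[:2]
--     return f"{calendar.month_abbr[month]} {year}".strip()
-- ===== SOURCE B (Python) =====
-- import calendar
--
--
-- def get_date_summary(csl_item):
--     """
--     Return date like
--     2019
--     Jun 2019
--     """
--     try:
--         date_parts = [int(x) for x in csl_item['issued']['date-parts'][0]]
--     except Exception:
--         return None
--     if not date_parts:
--         return None
--     year = date_parts[0]
--     month = date_parts[1] if len(date_parts) >= 2 else 0
--     return f"{calendar.month_abbr[month]} {year}".strip()
-- ===== Notes on version B (the rewrite author's own statement) =====
-- stated objective: simpler
-- what changed: B computes the summary directly from the date-parts integers (year = parts[0], month = parts[1] if present else 0) instead of formatting them into an iso string with '-'.join and then splitting and re-parsing that string with int().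
import Mathlib
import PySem

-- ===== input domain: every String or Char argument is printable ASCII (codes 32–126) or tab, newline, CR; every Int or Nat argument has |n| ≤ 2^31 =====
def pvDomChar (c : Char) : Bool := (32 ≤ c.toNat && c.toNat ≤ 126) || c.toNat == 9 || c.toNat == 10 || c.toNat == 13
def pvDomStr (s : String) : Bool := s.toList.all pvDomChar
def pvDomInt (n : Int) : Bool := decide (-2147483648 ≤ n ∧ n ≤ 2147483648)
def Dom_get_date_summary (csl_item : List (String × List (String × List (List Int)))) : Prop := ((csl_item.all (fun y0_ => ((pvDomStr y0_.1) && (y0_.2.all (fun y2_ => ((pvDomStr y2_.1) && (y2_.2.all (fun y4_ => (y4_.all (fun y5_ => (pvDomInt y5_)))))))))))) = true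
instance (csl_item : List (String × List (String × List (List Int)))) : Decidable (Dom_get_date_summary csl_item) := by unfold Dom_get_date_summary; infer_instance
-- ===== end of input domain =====

-- B replaces A's iso-string round-trip (format, '-'.join, split, re-parse with int())
-- by reading year and month directly from the date-parts integers; objective: simpler.

-- ===== PORT A =====

-- calendar.month_abbr (locale-independent abbreviations, index 0 is '')
def pvMonthAbbr : List String :=
  ["", "Jan", "Feb", "Mar", "Apr", "May", "Jun", "Jul", "Aug", "Sep", "Oct", "Nov", "Dec"]

-- f'{int(x):02d}' where x is already an int (so int(x) = x); %02d on an int is str(x).zfill(2)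
def pvFmt02 (x : Int) : String := PySem.Str.zfill (PySem.Int.toStr x) 2

-- hand port of int(s), step for step on its uses here: exact on the strings that reach it
-- inside Pre_ — the nonempty all-digit pieces of date.split('-') (no sign, no whitespace,
-- no underscores); none = ValueError
def pvParseInt? (s : String) : Option Int :=
  let cs := s.toList
  if cs ≠ [] ∧ cs.all Char.isDigit then
    some (cs.foldl (fun a c => 10 * a + ((c.toNat : Int) - 48)) 0)
  else none

-- helper get_date: iso-like string, or None when a lookup raises (caught by `except Exception`)
def pvGetDate (csl_item : List (String × List (String × List (List Int)))) : Option String :=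
  match PySem.Dict.get? (PySem.Dict.mk csl_item) "issued" with
  | none => none
  | some issued =>
    match PySem.Dict.get? (PySem.Dict.mk issued) "date-parts" with
    | none => none
    | some dps =>
      match PySem.List.pyGet? dps 0 with
      | none => none
      | some parts => some (PySem.Str.join "-" (parts.map pvFmt02))

-- f"{calendar.month_abbr[month]} {year}".strip(); none = IndexError from month_abbr[month]
def pvFinish (year month : Int) : Option String :=
  match PySem.List.pyGet? pvMonthAbbr month with
  | none => none
  | some ab => some (PySem.Str.strip (ab ++ " " ++ PySem.Int.toStr year))

def get_date_summary (csl_item : List (String × List (String × List (List Int)))) : Option String :=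
  match pvGetDate csl_item with
  | none => none
  | some date =>
    if date = "" then none
    else
      match PySem.Str.split? date "-" with
      | none => none  -- unreachable: the separator "-" is nonempty
      | some pieces =>
        match pieces.mapM pvParseInt? with
        | none => none  -- ValueError from int() propagates (excluded by Pre_)
        | some dateParts =>
          match dateParts with
          | [] => none  -- unreachable: split never returns an empty list
          | [y] => pvFinish y 0
          | y :: m :: _ => pvFinish y m

-- ===== PORT B =====
def get_date_summary_alt (csl_item : List (String × List (String × List (List Int)))) : Option String :=
  match PySem.Dict.get? (PySem.Dict.mk csl_item) "issued" with
  | none => none  -- KeyError caught, None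
  | some issued =>
  match PySem.Dict.get? (PySem.Dict.mk issued) "date-parts" with
  | none => none  -- KeyError caught, None
  | some dps =>
  match PySem.List.pyGet? dps 0 with
  | none => none  -- IndexError caught, None
  | some dateParts =>  -- [int(x) for x in …] on ints is the list itself
    match dateParts with
    | [] => none
    | year :: rest =>
      let month : Int := match rest with | [] => 0 | m :: _ => m
      match PySem.List.pyGet? pvMonthAbbr month with
      | none => none  -- IndexError from month_abbr[month] propagates (excluded by Pre_)
      | some ab => some (PySem.Str.strip (ab ++ " " ++ PySem.Int.toStr year))

-- ===== PRECONDITION & SPEC =====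

-- csl_item['issued']['date-parts'][0], none if any step raises (then A returns None normally)
def pvParts? (csl_item : List (String × List (String × List (List Int)))) : Option (List Int) :=
  (PySem.Dict.get? (PySem.Dict.mk csl_item) "issued").bind fun issued =>
  (PySem.Dict.get? (PySem.Dict.mk issued) "date-parts").bind fun dps =>
  PySem.List.pyGet? dps 0

def pvPartsOK : Option (List Int) → Bool
  | none => true
  | some parts => parts.all (fun x => decide (0 ≤ x)) && ((parts.drop 1).take 1).all (fun m => decide (m ≤ 12))

-- Pre_ excludes exactly the inputs on which A raises: a negative entry in date-parts[0] makes
-- the int() re-parse of the joined iso string raise ValueError, and a month entry > 12 makes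
-- calendar.month_abbr[month] raise IndexError.
def Pre_get_date_summary (csl_item : List (String × List (String × List (List Int)))) : Prop :=
  pvPartsOK (pvParts? csl_item) = true
instance (csl_item : List (String × List (String × List (List Int)))) : Decidable (Pre_get_date_summary csl_item) := by unfold Pre_get_date_summary; infer_instance

def pvWitness_get_date_summary : (List (String × List (String × List (List Int)))) :=
  [("issued", [("date-parts", [[2019, 6, 1]])])]

def Spec_get_date_summary (csl_item : List (String × List (String × List (List Int)))) (out : Option String) : Prop := out = get_date_summary_alt csl_item
instance (csl_item : List (String × List (String × List (List Int)))) (out : Option String) : Decidable (Spec_get_date_summary csl_item out) := by unfold Spec_get_date_summary; infer_instance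

-- ===== CLAIM (what is proved, stated in full; the proofs are below) =====
def Claim_equal_get_date_summary : Prop := ∀ (csl_item : List (String × List (String × List (List Int)))), Dom_get_date_summary csl_item → Pre_get_date_summary csl_item → Spec_get_date_summary csl_item (get_date_summary csl_item)

-- ===== LEMMAS AND PROOFS =====

-- the digit-accumulation step of pvParseInt?
def pvStep (a : Int) (c : Char) : Int := 10 * a + ((c.toNat : Int) - 48)

theorem pv_digitChar_val (d : Nat) (h : d < 10) : ((Nat.digitChar d).toNat : Int) - 48 = d := by
  interval_cases d <;> decide

theorem pv_foldl_toDigits (m : Nat) : ∀ a : Int,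
    (Nat.toDigits 10 m).foldl pvStep a = a * 10 ^ (Nat.toDigits 10 m).length + m := by
  induction m using Nat.strong_induction_on with
  | _ m ih =>
    intro a
    by_cases hm : m < 10
    · rw [Nat.toDigits_of_lt_base hm]
      simp [pvStep, pv_digitChar_val m hm]; ring
    · rw [Nat.toDigits_of_base_le (by norm_num) (by omega)]
      rw [List.foldl_append]
      have hlt : m / 10 < m := Nat.div_lt_self (by omega) (by norm_num)
      rw [ih _ hlt a]
      simp only [List.foldl_cons, List.foldl_nil, pvStep, List.length_append, List.length_cons,
        List.length_nil]
      rw [pv_digitChar_val _ (Nat.mod_lt _ (by norm_num))]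
      have : (m : Int) = 10 * (m / 10 : Nat) + (m % 10 : Nat) := by
        push_cast [Nat.div_add_mod]; omega
      rw [this]; ring

theorem pv_parse_fmt02 (x : Int) (hx : 0 ≤ x) : pvParseInt? (pvFmt02 x) = some x := by
  have hds : ∀ c ∈ Nat.toDigits 10 x.toNat, c.isDigit := by
    intro c hc; exact Nat.isDigit_of_mem_toDigits (by norm_num) (by norm_num) hc
  have htc : PySem.Int.toChars x = Nat.toDigits 10 x.toNat := by
    simp [PySem.Int.toChars, not_lt.mpr hx]
  have htl : (pvFmt02 x).toList = PySem.Chars.zfill (Nat.toDigits 10 x.toNat) 2 := by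
    rw [pvFmt02, PySem.Str.toList_zfill, PySem.Int.toList_toStr, htc]
  set ds := Nat.toDigits 10 x.toNat with hdsdef
  have hlen : 0 < ds.length := Nat.length_toDigits_pos
  have hne : ds ≠ [] := List.ne_nil_of_length_pos hlen
  have hval : List.foldl (fun a c => 10 * a + ((c.toNat : Int) - 48)) 0 ds = x := by
    show List.foldl pvStep 0 ds = x
    rw [hdsdef, pv_foldl_toDigits x.toNat 0]
    simp [Int.toNat_of_nonneg hx]
  by_cases h2 : (2 : Int) ≤ ds.length
  · have hz : PySem.Chars.zfill ds 2 = ds := by rw [PySem.Chars.zfill.eq_def, if_pos h2]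
    rw [pvParseInt?]
    simp only [htl, hz]
    rw [if_pos ⟨hne, by simpa [List.all_eq_true] using hds⟩, hval]
  · obtain ⟨c, hc⟩ : ∃ c, ds = [c] := by
      cases hds' : ds with
      | nil => exact absurd hds' hne
      | cons c t =>
        cases t with
        | nil => exact ⟨c, rfl⟩
        | cons d t' => rw [hds'] at h2; simp at h2; omega
    have hcd : c.isDigit := hds c (by rw [hc]; simp)
    have hcp : ¬ (c = '+' ∨ c = '-') := by
      rintro (rfl | rfl) <;> simp at hcd
    have hz : PySem.Chars.zfill ds 2 = '0' :: ds := by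
      rw [PySem.Chars.zfill.eq_def, if_neg h2, hc]
      simp [hcp]
    have hall : ∀ e ∈ '0' :: ds, e.isDigit := by
      intro e he
      rcases List.mem_cons.mp he with rfl | h
      · decide
      · exact hds _ h
    rw [pvParseInt?]
    simp only [htl, hz]
    rw [if_pos ⟨by simp, by simpa [List.all_eq_true] using hall⟩]
    simp only [List.foldl_cons]
    rw [show (10 * (0:Int) + (('0'.toNat : Int) - 48)) = 0 by decide, hval]

theorem pv_fmt02_facts (x : Int) (hx : 0 ≤ x) :
    (pvFmt02 x).toList ≠ [] ∧ (pvFmt02 x).toList.all Char.isDigit = true := by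
  by_contra hcond
  have h := pv_parse_fmt02 x hx
  rw [pvParseInt?] at h
  rw [if_neg hcond] at h
  cases h

theorem pv_fmt02_no_dash (x : Int) (hx : 0 ≤ x) : '-' ∉ (pvFmt02 x).toList := by
  intro hmem
  have h := (pv_fmt02_facts x hx).2
  rw [List.all_eq_true] at h
  have := h _ hmem
  simp at this

theorem pv_mapM_parse (parts : List Int) (h : ∀ x ∈ parts, 0 ≤ x) :
    (parts.map pvFmt02).mapM pvParseInt? = some parts := by
  induction parts with
  | nil => rfl
  | cons y t ih =>
    simp only [List.map_cons, List.mapM_cons, pv_parse_fmt02 y (h y (by simp)),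
      ih (fun x hx => h x (by simp [hx]))]
    rfl

theorem pv_go_skip (p : List Char) (hp : '-' ∉ p) : ∀ (k : Nat) (l cur : List Char) (acc : List (List Char)),
    PySem.Chars.splitOn.go ['-'] (p.length + k + 1) (p ++ l) cur acc
      = PySem.Chars.splitOn.go ['-'] (k + 1) l (p.reverse ++ cur) acc := by
  induction p with
  | nil => intro k l cur acc; simp
  | cons c p ih =>
    intro k l cur acc
    rw [List.cons_append, PySem.Chars.splitOn.go]
    have hc : c ≠ '-' := by rintro rfl; exact hp (List.mem_cons_self ..)
    have hpre : [('-' : Char)].isPrefixOf (c :: (p ++ l)) = false := by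
      simp [List.isPrefixOf, Ne.symm hc, BEq.beq]
    simp only [List.length_cons, hpre, if_false, Bool.false_eq_true]
    have h2 : p.length + 1 + k = p.length + k + 1 := by omega
    rw [h2, ih (fun h => hp (List.mem_cons_of_mem _ h)) k l (c :: cur) acc]
    simp

theorem pv_go_sep (k : Nat) (l cur : List Char) (acc : List (List Char)) :
    PySem.Chars.splitOn.go ['-'] (k + 1) ('-' :: l) cur acc
      = PySem.Chars.splitOn.go ['-'] k l [] (cur.reverse :: acc) := by
  rw [PySem.Chars.splitOn.go]; simp

theorem pv_go_nil (k : Nat) (cur : List Char) (acc : List (List Char)) :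
    PySem.Chars.splitOn.go ['-'] k [] cur acc = (cur.reverse :: acc).reverse := by
  cases k <;> rw [PySem.Chars.splitOn.go] <;> simp

theorem pv_go_join (pieces : List (List Char)) : pieces ≠ [] →
    (∀ p ∈ pieces, '-' ∉ p) → ∀ (k : Nat) (acc : List (List Char)),
    PySem.Chars.splitOn.go ['-'] ((PySem.Chars.join ['-'] pieces).length + k + 1)
        (PySem.Chars.join ['-'] pieces) [] acc
      = acc.reverse ++ pieces := by
  induction pieces with
  | nil => intro h; exact absurd rfl h
  | cons p rest ih =>
    intro _ hp k acc
    cases rest with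
    | nil =>
      rw [PySem.Chars.join_singleton]
      have := pv_go_skip p (hp p (by simp)) k [] [] acc
      rw [(by simp : p ++ ([] : List Char) = p)] at this
      rw [this, pv_go_nil]
      simp
    | cons q rest' =>
      rw [PySem.Chars.join_cons_cons]
      set J := PySem.Chars.join ['-'] (q :: rest') with hJ
      have hlen : (p ++ ['-'] ++ J).length = p.length + (J.length + 1) := by simp
      rw [hlen]
      have h1 : p.length + (J.length + 1) + k + 1 = p.length + (J.length + 1 + k) + 1 := by omega
      rw [h1, List.append_assoc, pv_go_skip p (hp p (by simp)) (J.length + 1 + k) (['-'] ++ J) [] acc]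
      have h2 : J.length + 1 + k + 1 = (J.length + k + 1) + 1 := by omega
      rw [(by simp : (['-'] ++ J : List Char) = '-' :: J), h2, pv_go_sep]
      simp only [List.append_nil, List.reverse_reverse]
      rw [ih (by simp) (fun r hr => hp r (by simp [hr])) k (p :: acc)]
      simp

theorem pv_splitOn_join (pieces : List (List Char)) (hne : pieces ≠ [])
    (hp : ∀ p ∈ pieces, '-' ∉ p) :
    PySem.Chars.splitOn (PySem.Chars.join ['-'] pieces) ['-'] = pieces := by
  rw [PySem.Chars.splitOn]
  have := pv_go_join pieces hne hp 0 []
  simpa using this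

theorem pv_join_toList_ne_nil (p : List Char) (ps : List (List Char)) (hp : p ≠ []) :
    PySem.Chars.join ['-'] (p :: ps) ≠ [] := by
  cases ps with
  | nil => rw [PySem.Chars.join_singleton]; exact hp
  | cons q rest =>
    rw [PySem.Chars.join_cons_cons]
    simp [hp]

-- ===== VERDICT (by name: the statement is the Claim_ definition above) =====
theorem get_date_summary_spec : Claim_equal_get_date_summary := by
  unfold Claim_equal_get_date_summary
  intro csl _dom pre
  unfold Spec_get_date_summary
  rw [Pre_get_date_summary] at pre
  rw [get_date_summary, get_date_summary_alt, pvGetDate]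
  cases h1 : PySem.Dict.get? (PySem.Dict.mk csl) "issued" with
  | none => rfl
  | some issued =>
  dsimp only
  cases h2 : PySem.Dict.get? (PySem.Dict.mk issued) "date-parts" with
  | none => rfl
  | some dps =>
  dsimp only
  cases h3 : PySem.List.pyGet? dps 0 with
  | none => rfl
  | some parts =>
  dsimp only
  rw [pvParts?, h1, Option.bind_some, h2, Option.bind_some, h3] at pre
  have hnn : ∀ x ∈ parts, 0 ≤ x := by
    simp only [pvPartsOK, Bool.and_eq_true, List.all_eq_true, decide_eq_true_eq] at pre
    exact fun x hx => pre.1 x hx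
  cases parts with
  | nil =>
    rw [if_pos (by decide : (PySem.Str.join "-" (List.map pvFmt02 ([] : List Int))) = "")]
  | cons y rest =>
    have hpldash : ∀ p ∈ (y :: rest).map (fun x => (pvFmt02 x).toList), '-' ∉ p := by
      intro p hp
      rw [List.mem_map] at hp
      obtain ⟨x, hx, rfl⟩ := hp
      exact pv_fmt02_no_dash x (hnn x hx)
    have hdl : (PySem.Str.join "-" ((y :: rest).map pvFmt02)).toList
        = PySem.Chars.join ['-'] ((y :: rest).map (fun x => (pvFmt02 x).toList)) := by
      rw [PySem.Str.toList_join, List.map_map,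
        show ("-" : String).toList = ['-'] from by decide]
      rfl
    have hdne : (PySem.Str.join "-" ((y :: rest).map pvFmt02)) ≠ "" := by
      intro he
      have h0 : (pvFmt02 y).toList ≠ [] := (pv_fmt02_facts y (hnn y (by simp))).1
      apply pv_join_toList_ne_nil ((pvFmt02 y).toList)
        (rest.map (fun x => (pvFmt02 x).toList)) h0
      rw [show ((pvFmt02 y).toList :: rest.map (fun x => (pvFmt02 x).toList)) = (y :: rest).map (fun x => (pvFmt02 x).toList) from rfl, ← hdl, he]
      rfl
    rw [if_neg hdne]
    have hsplit : PySem.Str.split? (PySem.Str.join "-" ((y :: rest).map pvFmt02)) "-"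
        = some (((y :: rest).map (fun x => (pvFmt02 x).toList)).map String.ofList) := by
      rw [PySem.Str.split?, PySem.Chars.split?.eq_1]
      rw [show ("-" : String).toList = ['-'] from by decide, hdl]
      rw [if_neg (by simp)]
      rw [pv_splitOn_join _ (by simp) hpldash]
      rfl
    have hofl : ((y :: rest).map (fun x => (pvFmt02 x).toList)).map String.ofList
        = (y :: rest).map pvFmt02 := by
      rw [List.map_map]
      apply List.map_congr_left
      intro x _
      simp
    rw [hsplit, hofl]
    dsimp only
    rw [pv_mapM_parse (y :: rest) hnn]
    cases rest with
    | nil => rfl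
    | cons m t => rfl
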